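-- pv_equiv track=rewrite | github.com/siimveske/checkio.org | 4. electronic station/018_wrong_family.py | is_family
-- ===== SOURCE A (Python) =====
-- def is_family(tree: list[list[str]]) -> bool:
--     graph, all_parents, all_children = parse_tree(tree)
--
--     root = all_parents - all_children
--     if len(root) != 1:
--         return False
--
--     visited = set()
--     stack = [root.pop()]
--     while stack:
--         parent = stack.pop()
--         if parent in visited:
--             return False
--         visited.add(parent)
--         for children in graph.get(parent, []):
--             stack.append(children)
--
--     people = all_parents.union(all_children)
--     return visited == people
--
-- def parse_tree(tree):
--     graph = {}
--     all_children = set()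
--     all_parents = set()
--
--     for node in tree:
--         parent, child = node
--         all_parents.add(parent)
--         all_children.add(child)
--
--         if parent in graph:
--             graph[parent].append(child)
--         else:
--             graph[parent] = [child]
--
--     return (graph, all_parents, all_children)
-- ===== SOURCE B (Python) =====
-- def is_family(tree: list[list[str]]) -> bool:
--     parents = set()
--     children = set()
--     for parent, child in tree:
--         parents.add(parent)
--         children.add(child)
--
--     roots = parents - children
--     if len(roots) != 1:
--         return False
--
--     people = parents | children
--     if len(people) != len(tree) + 1:
--         return False
--
--     reach = set(roots)
--     for _ in range(len(tree)):
--         reach = reach | {child for parent, child in tree if parent in reach}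
--     return len(reach) == len(people)
-- ===== Notes on version B (the rewrite author's own statement) =====
-- stated objective: alternative
-- what changed: Replaces the dict-of-children + explicit-stack DFS with revisit detection and final set comparison by arithmetic checks (exactly one root and |nodes| == |edges|+1, which already forces every node to have a unique parent) plus a dict-free edge-relaxation reachability closure over the raw edge list.
import Mathlib
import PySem

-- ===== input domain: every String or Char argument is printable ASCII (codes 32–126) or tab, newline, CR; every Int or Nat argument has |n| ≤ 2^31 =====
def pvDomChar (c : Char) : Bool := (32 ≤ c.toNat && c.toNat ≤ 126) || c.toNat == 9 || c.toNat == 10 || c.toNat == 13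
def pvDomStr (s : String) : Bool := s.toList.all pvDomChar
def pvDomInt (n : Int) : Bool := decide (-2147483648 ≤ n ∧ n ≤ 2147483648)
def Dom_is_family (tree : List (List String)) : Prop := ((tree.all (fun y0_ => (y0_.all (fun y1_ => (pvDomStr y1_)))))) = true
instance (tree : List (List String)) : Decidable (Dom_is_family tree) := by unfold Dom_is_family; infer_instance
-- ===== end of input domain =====

-- B replaces A's dict-of-children + explicit-stack DFS (revisit detection, final set
-- comparison) by arithmetic checks (one root, |nodes| = |edges|+1) plus a dict-free
-- edge-relaxation reachability closure; objective: alternative (not claimed faster).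

-- ===== PORT A =====
-- parse_tree: builds (graph, all_parents, all_children); a row of length ≠ 2 makes
-- Python raise ValueError (excluded by Pre_), here such rows leave the accumulator unchanged.
def pvParse (tree : List (List String)) :
    PySem.Dict String (List String) × PySem.Set String × PySem.Set String :=
  tree.foldl (fun acc node =>
    match node with
    | [parent, child] =>
      let graph := if acc.1.contains parent
        then acc.1.modify parent [] (fun l => l ++ [child])
        else acc.1.insert parent [child]
      (graph, PySem.Set.add acc.2.1 parent, PySem.Set.add acc.2.2 child)
    | _ => acc)
    (PySem.Dict.empty, PySem.Set.empty, PySem.Set.empty)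

-- The 'while stack' loop; it pops once per iteration, and the total number of pops is at
-- most 1 + (number of rows), so fuel = tree.length + 1 is proved never to run out where
-- the equivalence needs it; fuel-0 with a nonempty stack returns none like a revisit.
def pvDfs (g : PySem.Dict String (List String)) :
    Nat → PySem.Set String → List String → Option (PySem.Set String)
  | _, visited, [] => some visited
  | 0, _, _ :: _ => none
  | fuel+1, visited, h :: t =>
    let parent := (h :: t).getLast (List.cons_ne_nil h t)
    if PySem.Set.contains visited parent then none
    else pvDfs g fuel (PySem.Set.add visited parent) ((h :: t).dropLast ++ g.getD parent [])

def is_family (tree : List (List String)) : Bool :=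
  let parsed := pvParse tree
  -- root = all_parents - all_children; len(root) != 1 → False, else stack = [root.pop()]
  match PySem.Set.diff parsed.2.1 parsed.2.2 with
  | [r] =>
    match pvDfs parsed.1 (tree.length + 1) PySem.Set.empty [r] with
    | none => false
    | some visited => PySem.Set.equal visited (PySem.Set.union parsed.2.1 parsed.2.2)
  | _ => false

-- ===== PORT B =====
def is_family_alt (tree : List (List String)) : Bool :=
  let pc := tree.foldl (fun acc node =>
      match node with
      | [parent, child] => (PySem.Set.add acc.1 parent, PySem.Set.add acc.2 child)
      | _ => acc) (PySem.Set.empty, PySem.Set.empty)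
  match PySem.Set.diff pc.1 pc.2 with
  | [r] =>
    let people := PySem.Set.union pc.1 pc.2
    if people.length = tree.length + 1 then
      let reach := (List.range tree.length).foldl (fun reach _ =>
        PySem.Set.union reach (PySem.Set.ofList (tree.filterMap (fun node =>
          match node with
          | [parent, child] => if PySem.Set.contains reach parent then some child else none
          | _ => none)))) [r]
      reach.length == people.length
    else false
  | _ => false

-- ===== PRECONDITION & SPEC =====
-- Pre_ excludes exactly the inputs where Python A raises ValueError ("not enough / too
-- many values to unpack") on a row of length ≠ 2; B raises the same way there.
def Pre_is_family (tree : List (List String)) : Prop := ∀ node ∈ tree, node.length = 2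
instance (tree : List (List String)) : Decidable (Pre_is_family tree) := by
  unfold Pre_is_family; infer_instance

def pvWitness_is_family : List (List String) := [["a", "b"], ["a", "c"]]

def Spec_is_family (tree : List (List String)) (out : Bool) : Prop := out = is_family_alt tree
instance (tree : List (List String)) (out : Bool) : Decidable (Spec_is_family tree out) := by
  unfold Spec_is_family; infer_instance

-- ===== CLAIM (what is proved, stated in full; the proofs are below) =====
def Claim_equal_is_family : Prop :=
  ∀ (tree : List (List String)), Dom_is_family tree → Pre_is_family tree →
    Spec_is_family tree (is_family tree)

-- ===== LEMMAS AND PROOFS =====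

-- The well-formed rows as an edge list (under Pre_ this is all of them).
def pvEdges (tree : List (List String)) : List (String × String) :=
  tree.filterMap (fun node => match node with | [p, c] => some (p, c) | _ => none)

-- children of p, in edge order (what A's graph.get(p, []) holds)
def pvAdj (E : List (String × String)) (p : String) : List String :=
  (E.filter (fun e => e.1 == p)).map Prod.snd

inductive pvReach (E : List (String × String)) (r : String) : String → Prop
  | refl : pvReach E r r
  | step {p c} : pvReach E r p → (p, c) ∈ E → pvReach E r c

-- B's relaxation step and its iteration
def pvStep (tree : List (List String)) (reach : PySem.Set String) : PySem.Set String :=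
  PySem.Set.union reach (PySem.Set.ofList (tree.filterMap (fun node =>
    match node with
    | [parent, child] => if PySem.Set.contains reach parent then some child else none
    | _ => none)))

def pvIter (tree : List (List String)) : Nat → PySem.Set String → PySem.Set String
  | 0, s => s
  | n+1, s => pvIter tree n (pvStep tree s)

-- ---- parsing characterisation ----

theorem pv_dict_step (d : PySem.Dict String (List String)) (p c : String) :
    (if d.contains p then d.modify p [] (fun l => l ++ [c]) else d.insert p [c]) =
      d.modify p [] (fun l => l ++ [c]) := by
  by_cases h : d.contains p
  · simp [h]
  · simp [h, PySem.Dict.modify, PySem.Dict.getD_of_not_contains d [] (by simpa using h)]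

theorem pvParse_eq (tree : List (List String)) :
    ∀ (g : PySem.Dict String (List String)) (s1 s2 : PySem.Set String),
      tree.foldl (fun acc node =>
        match node with
        | [parent, child] =>
          let graph := if acc.1.contains parent
            then acc.1.modify parent [] (fun l => l ++ [child])
            else acc.1.insert parent [child]
          (graph, PySem.Set.add acc.2.1 parent, PySem.Set.add acc.2.2 child)
        | _ => acc) (g, s1, s2) =
      ((pvEdges tree).foldl (fun d e => d.modify e.1 [] (fun l => l ++ [e.2])) g,
       PySem.Set.update s1 ((pvEdges tree).map Prod.fst),
       PySem.Set.update s2 ((pvEdges tree).map Prod.snd)) := by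
  induction tree with
  | nil => intro g s1 s2; simp [pvEdges, PySem.Set.update]
  | cons node rest ih =>
    intro g s1 s2
    match node with
    | [] => simpa [pvEdges] using ih g s1 s2
    | [a] => simpa [pvEdges] using ih g s1 s2
    | a :: b :: c :: t => simpa [pvEdges] using ih g s1 s2
    | [a, b] =>
      simp only [List.foldl_cons]
      rw [pv_dict_step, ih]
      simp [pvEdges, PySem.Set.update]

theorem pvParseB_eq (tree : List (List String)) :
    ∀ (s1 s2 : PySem.Set String),
      tree.foldl (fun acc node =>
        match node with
        | [parent, child] => (PySem.Set.add acc.1 parent, PySem.Set.add acc.2 child)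
        | _ => acc) (s1, s2) =
      (PySem.Set.update s1 ((pvEdges tree).map Prod.fst),
       PySem.Set.update s2 ((pvEdges tree).map Prod.snd)) := by
  induction tree with
  | nil => intro s1 s2; simp [pvEdges, PySem.Set.update]
  | cons node rest ih =>
    intro s1 s2
    match node with
    | [] => simpa [pvEdges] using ih s1 s2
    | [a] => simpa [pvEdges] using ih s1 s2
    | a :: b :: c :: t => simpa [pvEdges] using ih s1 s2
    | [a, b] =>
      simp only [List.foldl_cons]
      rw [ih]
      simp [pvEdges, PySem.Set.update]

theorem pvParse_parents (tree : List (List String)) :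
    (pvParse tree).2.1 = PySem.Set.ofList ((pvEdges tree).map Prod.fst) := by
  simp [pvParse, pvParse_eq tree, PySem.Set.ofList_eq_foldl, PySem.Set.update, PySem.Set.empty]

theorem pvParse_children (tree : List (List String)) :
    (pvParse tree).2.2 = PySem.Set.ofList ((pvEdges tree).map Prod.snd) := by
  simp [pvParse, pvParse_eq tree, PySem.Set.ofList_eq_foldl, PySem.Set.update, PySem.Set.empty]

theorem pvParse_getD (tree : List (List String)) (p : String) :
    (pvParse tree).1.getD p [] = pvAdj (pvEdges tree) p := by
  simp [pvParse, pvParse_eq tree, pvAdj]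
  rw [PySem.Dict.getD_foldl_modify_append]
  simp [PySem.Dict.getD_empty]

theorem pvStepList_eq (tree : List (List String)) (reach : PySem.Set String) :
    tree.filterMap (fun node =>
      match node with
      | [parent, child] => if PySem.Set.contains reach parent then some child else none
      | _ => none) =
    ((pvEdges tree).filter (fun e => PySem.Set.contains reach e.1)).map Prod.snd := by
  induction tree with
  | nil => simp [pvEdges]
  | cons node rest ih =>
    match node with
    | [] => simpa [pvEdges] using ih
    | [a] => simpa [pvEdges] using ih
    | a :: b :: c :: t => simpa [pvEdges] using ih
    | [a, b] =>
      by_cases h : a ∈ reach <;>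
      · simp [pvEdges, h]
        simpa using ih

theorem pvEdges_length_of_pre (tree : List (List String)) (h : Pre_is_family tree) :
    (pvEdges tree).length = tree.length := by
  revert h
  induction tree with
  | nil => intro _; simp [pvEdges]
  | cons node rest ih =>
    intro h
    have h2 : node.length = 2 := h node (List.mem_cons_self ..)
    obtain ⟨a, b, rfl⟩ := List.length_eq_two.mp h2
    have hrest := ih (fun n hn => h n (List.mem_cons_of_mem _ hn))
    simp only [pvEdges, List.filterMap_cons, List.length_cons] at hrest ⊢
    omega

-- ---- generic helpers ----

theorem pv_countP_split {α : Type} (l : List α) (f h k : α → Bool)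
    (hp : ∀ c ∈ l, (f c).toNat + (h c).toNat = (k c).toNat) :
    l.countP f + l.countP h = l.countP k := by
  induction l with
  | nil => simp
  | cons c l ih =>
    have hc := hp c (List.mem_cons_self ..)
    have ihl := ih (fun x hx => hp x (List.mem_cons_of_mem _ hx))
    simp only [List.countP_cons]
    cases hf : f c <;> cases hh : h c <;> cases hk : k c <;>
      simp [hf, hh, hk] at hc ⊢ <;> omega

theorem pv_update_prefix (s : PySem.Set String) (l : List String) :
    ∃ t, PySem.Set.update s l = s ++ t := by
  induction l generalizing s with
  | nil => exact ⟨[], by simp [PySem.Set.update]⟩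
  | cons x l ih =>
    simp only [PySem.Set.update, List.foldl_cons]
    obtain ⟨t, ht⟩ := ih (PySem.Set.add s x)
    simp only [PySem.Set.update] at ht
    by_cases hx : x ∈ s
    · have ha : PySem.Set.add s x = s := by simp [PySem.Set.add, hx]
      rw [ha] at ht ⊢
      exact ⟨t, ht⟩
    · have ha : PySem.Set.add s x = s ++ [x] := by simp [PySem.Set.add, hx]
      rw [ha] at ht ⊢
      exact ⟨x :: t, by simpa using ht⟩

-- ---- adjacency facts ----

theorem pv_mem_adj {E : List (String × String)} {p c : String} :
    c ∈ pvAdj E p ↔ (p, c) ∈ E := by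
  simp only [pvAdj, List.mem_map, List.mem_filter, beq_iff_eq]
  constructor
  · rintro ⟨⟨a, b⟩, ⟨he, hp⟩, hc⟩
    simp only at hp hc; subst hp; subst hc; exact he
  · intro h; exact ⟨(p, c), ⟨h, rfl⟩, rfl⟩

theorem pv_adj_sublist (E : List (String × String)) (p : String) :
    List.Sublist (pvAdj E p) (E.map Prod.snd) :=
  List.Sublist.map Prod.snd List.filter_sublist

theorem pv_adj_nodup {E : List (String × String)} (hch : (E.map Prod.snd).Nodup)
    (p : String) : (pvAdj E p).Nodup :=
  (pv_adj_sublist E p).nodup hch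

theorem pv_par_unique {E : List (String × String)} (hch : (E.map Prod.snd).Nodup)
    {c p q : String} (hp : c ∈ pvAdj E p) (hq : c ∈ pvAdj E q) : p = q := by
  rw [pv_mem_adj] at hp hq
  induction E with
  | nil => cases hp
  | cons e E ih =>
    simp only [List.map_cons, List.nodup_cons] at hch
    rcases List.mem_cons.mp hp with h1 | h1 <;> rcases List.mem_cons.mp hq with h2 | h2
    · subst h1; exact ((Prod.mk.injEq ..).mp h2).1.symm
    · subst h1
      exact absurd (by simpa using List.mem_map_of_mem (f := Prod.snd) h2) (by simpa using hch.1)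
    · subst h2
      exact absurd (by simpa using List.mem_map_of_mem (f := Prod.snd) h1) (by simpa using hch.1)
    · exact ih hch.2 h1 h2

theorem pv_sum_ite (L : List String) (f : String → Bool) :
    (L.map fun p => if f p then 1 else 0).sum = L.countP f := by
  induction L with
  | nil => simp
  | cons x L ih =>
    cases h : f x
    · simp [h, ih]
    · simp [h, ih]; omega

theorem pv_countP_sub (ch adjp : List String) (hch : ch.Nodup) (ha : adjp.Nodup)
    (hsub : ∀ c ∈ adjp, c ∈ ch) :
    ch.countP (fun c => adjp.contains c) = adjp.length := by
  rw [List.countP_eq_length_filter]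
  have hnd : (ch.filter (fun c => adjp.contains c)).Nodup := hch.filter _
  have hperm : List.Perm (ch.filter (fun c => adjp.contains c)) adjp := by
    refine (List.perm_ext_iff_of_nodup hnd ha).mpr ?_
    intro x
    simp only [List.mem_filter, List.contains_iff_mem]
    exact ⟨fun h => h.2, fun h => ⟨hsub x h, h⟩⟩
  exact hperm.length_eq

theorem pv_reach_mem {E : List (String × String)} {r x : String}
    (h : pvReach E r x) : x = r ∨ x ∈ E.map Prod.snd := by
  induction h with
  | refl => exact Or.inl rfl
  | step _ he _ => exact Or.inr (List.mem_map_of_mem he)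

-- ---- DFS lemmas (A's loop) ----

theorem pvDfs_shape (g : PySem.Dict String (List String)) :
    ∀ (fuel : Nat) (visited stack v : List String),
      pvDfs g fuel visited stack = some v →
      ∃ w, v = visited ++ w ∧ w.Nodup ∧ (∀ x ∈ w, x ∉ visited) ∧
        w.length = stack.length + (w.map (fun p => (g.getD p []).length)).sum := by
  intro fuel
  induction fuel with
  | zero =>
    intro visited stack v h
    cases stack with
    | nil =>
      simp only [pvDfs, Option.some.injEq] at h
      exact ⟨[], by simp [h], by simp, by simp, by simp⟩
    | cons hd tl => simp [pvDfs] at h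
  | succ fuel ih =>
    intro visited stack v h
    cases stack with
    | nil =>
      simp only [pvDfs, Option.some.injEq] at h
      exact ⟨[], by simp [h], by simp, by simp, by simp⟩
    | cons hd tl =>
      rw [pvDfs] at h
      set p := (hd :: tl).getLast (List.cons_ne_nil hd tl) with hp
      by_cases hc : p ∈ visited
      · simp [hc] at h
      · simp only [PySem.Set.contains_iff, hc, if_false] at h
        have hpnv : p ∉ visited := hc
        have hadd : PySem.Set.add visited p = visited ++ [p] := by
          simp [PySem.Set.add, hc]
        rw [hadd] at h
        obtain ⟨w', hv, hnd', hnm', hlen'⟩ := ih _ _ _ h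
        refine ⟨p :: w', by simp [hv], ?_, ?_, ?_⟩
        · exact List.nodup_cons.mpr
            ⟨fun hm => by simpa using hnm' p hm, hnd'⟩
        · intro x hx
          rcases List.mem_cons.mp hx with rfl | hx
          · exact hpnv
          · exact fun hm => hnm' x hx (List.mem_append_left _ hm)
        · simp only [List.length_append, List.length_dropLast, List.length_cons,
            List.map_cons, List.sum_cons] at hlen' ⊢
          omega

theorem pvDfs_mem_P (g : PySem.Dict String (List String)) (P : String → Prop)
    (hP : ∀ p c, P p → c ∈ g.getD p [] → P c) :
    ∀ (fuel : Nat) (visited stack v : List String),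
      pvDfs g fuel visited stack = some v →
      (∀ x ∈ visited, P x) → (∀ x ∈ stack, P x) → ∀ x ∈ v, P x := by
  intro fuel
  induction fuel with
  | zero =>
    intro visited stack v h hv hs
    cases stack with
    | nil => simp only [pvDfs, Option.some.injEq] at h; exact h ▸ hv
    | cons hd tl => simp [pvDfs] at h
  | succ fuel ih =>
    intro visited stack v h hv hs
    cases stack with
    | nil => simp only [pvDfs, Option.some.injEq] at h; exact h ▸ hv
    | cons hd tl =>
      rw [pvDfs] at h
      set p := (hd :: tl).getLast (List.cons_ne_nil hd tl) with hp
      by_cases hc : p ∈ visited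
      · simp [hc] at h
      · simp only [PySem.Set.contains_iff, hc, if_false] at h
        have hPp : P p := hs p (List.getLast_mem _)
        refine ih _ _ _ h ?_ ?_
        · intro x hx
          rcases (PySem.Set.mem_add visited p x).mp hx with hx | rfl
          · exact hv x hx
          · exact hPp
        · intro x hx
          rcases List.mem_append.mp hx with hx | hx
          · exact hs x (List.mem_of_mem_dropLast hx)
          · exact hP p x hPp hx

theorem pvDfs_closed (g : PySem.Dict String (List String)) :
    ∀ (fuel : Nat) (visited stack v : List String),
      pvDfs g fuel visited stack = some v →
      (∀ p ∈ visited, ∀ c ∈ g.getD p [], c ∈ visited ++ stack) →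
      (∀ x ∈ visited ++ stack, x ∈ v) ∧ (∀ p ∈ v, ∀ c ∈ g.getD p [], c ∈ v) := by
  intro fuel
  induction fuel with
  | zero =>
    intro visited stack v h hpre
    cases stack with
    | nil =>
      simp only [pvDfs, Option.some.injEq] at h
      subst h
      exact ⟨fun x hx => by simpa using hx, fun q hq c hc => by
        simpa using hpre q hq c hc⟩
    | cons hd tl => simp [pvDfs] at h
  | succ fuel ih =>
    intro visited stack v h hpre
    cases stack with
    | nil =>
      simp only [pvDfs, Option.some.injEq] at h
      subst h
      exact ⟨fun x hx => by simpa using hx, fun q hq c hc => by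
        simpa using hpre q hq c hc⟩
    | cons hd tl =>
      rw [pvDfs] at h
      set p := (hd :: tl).getLast (List.cons_ne_nil hd tl) with hp
      by_cases hc : p ∈ visited
      · simp [hc] at h
      · simp only [PySem.Set.contains_iff, hc, if_false] at h
        have hadd : PySem.Set.add visited p = visited ++ [p] := by
          simp [PySem.Set.add, hc]
        rw [hadd] at h
        have hstack : (hd :: tl).dropLast ++ [p] = hd :: tl :=
          List.dropLast_concat_getLast (List.cons_ne_nil hd tl)
        have htrans : ∀ x, x ∈ visited ++ hd :: tl →
            x ∈ (visited ++ [p]) ++ ((hd :: tl).dropLast ++ g.getD p []) := by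
          intro x hx
          rw [← hstack] at hx
          simp only [List.mem_append, List.mem_singleton] at hx ⊢
          tauto
        have hpre' : ∀ q ∈ visited ++ [p], ∀ c ∈ g.getD q [],
            c ∈ (visited ++ [p]) ++ ((hd :: tl).dropLast ++ g.getD p []) := by
          intro q hq c hcq
          rcases List.mem_append.mp hq with hq | hq
          · exact htrans c (hpre q hq c hcq)
          · rcases List.mem_singleton.mp hq with rfl
            exact List.mem_append_right _ (List.mem_append_right _ hcq)
        obtain ⟨h1, h2⟩ := ih _ _ _ h hpre'
        exact ⟨fun x hx => h1 x (htrans x hx), h2⟩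

theorem pvDfs_complete (g : PySem.Dict String (List String))
    (E : List (String × String)) (hadj : ∀ p, g.getD p [] = pvAdj E p)
    (hch : (E.map Prod.snd).Nodup) :
    ∀ (fuel : Nat) (visited stack : List String),
      (visited ++ stack).Nodup →
      (∀ p c, c ∈ pvAdj E p → (c ∈ visited ++ stack ↔ p ∈ visited)) →
      stack.length + ((E.map Prod.snd).filter
        (fun c => !(visited ++ stack).contains c)).length ≤ fuel →
      ∃ v, pvDfs g fuel visited stack = some v := by
  intro fuel
  induction fuel with
  | zero =>
    intro visited stack hnd hc hf
    cases stack with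
    | nil => exact ⟨visited, by simp [pvDfs]⟩
    | cons hd tl => exfalso; simp only [List.length_cons] at hf; omega
  | succ fuel ih =>
    intro visited stack hnd hc hf
    cases stack with
    | nil => exact ⟨visited, by simp [pvDfs]⟩
    | cons hd tl =>
      set p := (hd :: tl).getLast (List.cons_ne_nil hd tl) with hp
      have hstack : (hd :: tl).dropLast ++ [p] = hd :: tl :=
        List.dropLast_concat_getLast (List.cons_ne_nil hd tl)
      have hpmem : p ∈ hd :: tl := List.getLast_mem _
      have hpnv : p ∉ visited := fun hv =>
        (List.disjoint_of_nodup_append hnd) hv hpmem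
      have hadd : PySem.Set.add visited p = visited ++ [p] := by
        simp [PySem.Set.add, hpnv]
      set adjp := g.getD p [] with hadjp
      have hadjp' : adjp = pvAdj E p := hadj p
      have hadjnd : adjp.Nodup := hadjp' ▸ pv_adj_nodup hch p
      have hadjch : ∀ c ∈ adjp, c ∈ E.map Prod.snd := by
        intro c hcp
        have : (p, c) ∈ E := pv_mem_adj.mp (hadjp' ▸ hcp)
        simpa using List.mem_map_of_mem (f := Prod.snd) this
      have hfresh : ∀ c ∈ adjp, c ∉ visited ++ hd :: tl := by
        intro c hcp hx
        exact hpnv ((hc p c (hadjp' ▸ hcp)).mp hx)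
      have hmemold : ∀ x, x ∈ visited ++ hd :: tl ↔
          x ∈ visited ∨ x ∈ (hd :: tl).dropLast ∨ x = p := by
        intro x
        conv_lhs => rw [← hstack]
        simp only [List.mem_append, List.mem_singleton]
      have hmemnew : ∀ x, x ∈ (visited ++ [p]) ++ ((hd :: tl).dropLast ++ adjp) ↔
          x ∈ visited ++ hd :: tl ∨ x ∈ adjp := by
        intro x
        rw [hmemold]
        simp only [List.mem_append, List.mem_singleton]
        tauto
      have hndnew : ((visited ++ [p]) ++ ((hd :: tl).dropLast ++ adjp)).Nodup := by
        have h0 : (([p] ++ (hd :: tl).dropLast) ++ adjp).Perm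
            (((hd :: tl).dropLast ++ [p]) ++ adjp) :=
          List.Perm.append_right adjp List.perm_append_comm
        have h1 := h0.append_left visited
        rw [hstack] at h1
        have h2 : ((visited ++ [p]) ++ ((hd :: tl).dropLast ++ adjp)).Perm
            (visited ++ (hd :: tl ++ adjp)) := by
          simpa [List.append_assoc] using h1
        refine h2.nodup_iff.mpr ?_
        have h3 := List.Nodup.append hnd hadjnd (fun a ha hb => hfresh a hb ha)
        simpa [List.append_assoc] using h3
      have hc' : ∀ q c, c ∈ pvAdj E q →
          (c ∈ (visited ++ [p]) ++ ((hd :: tl).dropLast ++ adjp) ↔ q ∈ visited ++ [p]) := by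
        intro q c hq
        by_cases hqp : q = p
        · subst hqp
          constructor
          · intro _; exact List.mem_append_right _ (List.mem_singleton.mpr rfl)
          · intro _
            exact List.mem_append_right _ (List.mem_append_right _ (hadjp' ▸ hq))
        · have hcnp : c ∉ adjp := fun hcin =>
            hqp (pv_par_unique hch hq (hadjp' ▸ hcin))
          rw [hmemnew]
          constructor
          · rintro (hx | hx)
            · exact List.mem_append_left _ ((hc q c hq).mp hx)
            · exact absurd hx hcnp
          · intro hx
            rcases List.mem_append.mp hx with hx | hx
            · exact Or.inl ((hc q c hq).mpr hx)
            · exact absurd (List.mem_singleton.mp hx) hqp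
      have hcount : (E.map Prod.snd).countP
            (fun c => !((visited ++ [p]) ++ ((hd :: tl).dropLast ++ adjp)).contains c)
            + adjp.length =
          (E.map Prod.snd).countP (fun c => !(visited ++ hd :: tl).contains c) := by
        rw [← pv_countP_sub (E.map Prod.snd) adjp hch hadjnd hadjch]
        refine pv_countP_split (E.map Prod.snd) _ _ _ ?_
        intro c _
        by_cases h1 : c ∈ adjp
        · have hb1 : adjp.contains c = true := List.contains_iff_mem.mpr h1
          have hb2 : ((visited ++ [p]) ++ ((hd :: tl).dropLast ++ adjp)).contains c = true :=
            List.contains_iff_mem.mpr ((hmemnew c).mpr (Or.inr h1))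
          have hb3 : (visited ++ hd :: tl).contains c = false :=
            Bool.eq_false_iff.mpr (fun hh => hfresh c h1 (List.contains_iff_mem.mp hh))
          simp only [hb1, hb2, hb3]; rfl
        · have hb1 : adjp.contains c = false :=
            Bool.eq_false_iff.mpr (fun hh => h1 (List.contains_iff_mem.mp hh))
          by_cases h3 : c ∈ visited ++ hd :: tl
          · have hb2 : ((visited ++ [p]) ++ ((hd :: tl).dropLast ++ adjp)).contains c = true :=
              List.contains_iff_mem.mpr ((hmemnew c).mpr (Or.inl h3))
            have hb3 : (visited ++ hd :: tl).contains c = true :=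
              List.contains_iff_mem.mpr h3
            simp only [hb1, hb2, hb3]; rfl
          · have hb2 : ((visited ++ [p]) ++ ((hd :: tl).dropLast ++ adjp)).contains c = false :=
              Bool.eq_false_iff.mpr (fun hh => by
                rcases (hmemnew c).mp (List.contains_iff_mem.mp hh) with hx | hx
                exacts [h3 hx, h1 hx])
            have hb3 : (visited ++ hd :: tl).contains c = false :=
              Bool.eq_false_iff.mpr (fun hh => h3 (List.contains_iff_mem.mp hh))
            simp only [hb1, hb2, hb3]; rfl
      have hflen : ((hd :: tl).dropLast ++ adjp).length +
          ((E.map Prod.snd).filter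
            (fun c => !((visited ++ [p]) ++ ((hd :: tl).dropLast ++ adjp)).contains c)).length
          ≤ fuel := by
        rw [← List.countP_eq_length_filter] at hf ⊢
        simp only [List.length_append, List.length_dropLast, List.length_cons] at hf ⊢
        omega
      obtain ⟨v, hv⟩ := ih (visited ++ [p]) ((hd :: tl).dropLast ++ adjp) hndnew hc' hflen
      refine ⟨v, ?_⟩
      rw [pvDfs]
      simp only [← hp, PySem.Set.contains_iff, hpnv, if_false]
      rw [hadd, ← hadjp]
      exact hv

-- ---- relaxation lemmas (B's loop) ----

theorem pv_iter_succ' (tree : List (List String)) (n : Nat) (s : PySem.Set String) :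
    pvIter tree (n+1) s = pvStep tree (pvIter tree n s) := by
  induction n generalizing s with
  | zero => rfl
  | succ n ih => simp only [pvIter]; exact ih (pvStep tree s)

theorem pv_foldl_range_eq (tree : List (List String)) :
    ∀ (n : Nat) (s : PySem.Set String),
      (List.range n).foldl (fun reach _ =>
        PySem.Set.union reach (PySem.Set.ofList (tree.filterMap (fun node =>
          match node with
          | [parent, child] => if PySem.Set.contains reach parent then some child else none
          | _ => none)))) s = pvIter tree n s := by
  have aux : ∀ (n : Nat) (s : PySem.Set String),
      (List.range n).foldl (fun reach _ => pvStep tree reach) s = pvIter tree n s := by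
    intro n
    induction n with
    | zero => intro s; simp [pvIter]
    | succ n ih =>
      intro s
      rw [List.range_succ, List.foldl_append, ih, List.foldl_cons, List.foldl_nil,
        ← pv_iter_succ']
  exact aux

theorem pv_mem_step (tree : List (List String)) (s : PySem.Set String) (x : String) :
    x ∈ pvStep tree s ↔ x ∈ s ∨ ∃ e ∈ pvEdges tree, e.1 ∈ s ∧ e.2 = x := by
  rw [pvStep, PySem.Set.mem_union, PySem.Set.mem_ofList, pvStepList_eq]
  simp only [List.mem_map, List.mem_filter, PySem.Set.contains_iff]
  constructor
  · rintro (h | ⟨e, ⟨he, hmem⟩, rfl⟩)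
    · exact Or.inl h
    · exact Or.inr ⟨e, he, by simpa using hmem, rfl⟩
  · rintro (h | ⟨e, he, hmem, rfl⟩)
    · exact Or.inl h
    · exact Or.inr ⟨e, ⟨he, by simpa using hmem⟩, rfl⟩

theorem pv_step_nodup (tree : List (List String)) (s : PySem.Set String)
    (hs : s.Nodup) : (pvStep tree s).Nodup :=
  PySem.Set.nodup_union _ _ hs

theorem pv_step_prefix (tree : List (List String)) (s : PySem.Set String) :
    ∃ t, pvStep tree s = s ++ t := by
  simp only [pvStep, PySem.Set.union]; exact pv_update_prefix _ _

theorem pv_iter_sound (tree : List (List String)) (r : String) :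
    ∀ (n : Nat) (s : PySem.Set String),
      (∀ x ∈ s, pvReach (pvEdges tree) r x) →
      ∀ x ∈ pvIter tree n s, pvReach (pvEdges tree) r x := by
  intro n
  induction n with
  | zero => intro s hs x hx; exact hs x hx
  | succ n ih =>
    intro s hs x hx
    simp only [pvIter] at hx
    refine ih (pvStep tree s) ?_ x hx
    intro y hy
    rcases (pv_mem_step tree s y).mp hy with h | ⟨e, he, hmem, rfl⟩
    · exact hs y h
    · exact pvReach.step (hs e.1 hmem) (by simpa using he)

theorem pv_iter_nodup (tree : List (List String)) :
    ∀ (n : Nat) (s : PySem.Set String), s.Nodup → (pvIter tree n s).Nodup := by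
  intro n
  induction n with
  | zero => intro s hs; exact hs
  | succ n ih => intro s hs; exact ih (pvStep tree s) (pv_step_nodup tree s hs)

theorem pv_iter_sub (tree : List (List String)) (r : String) :
    ∀ (n : Nat) (s : PySem.Set String),
      (∀ x ∈ s, x = r ∨ x ∈ (pvEdges tree).map Prod.snd) →
      ∀ x ∈ pvIter tree n s, x = r ∨ x ∈ (pvEdges tree).map Prod.snd := by
  intro n
  induction n with
  | zero => intro s hs x hx; exact hs x hx
  | succ n ih =>
    intro s hs x hx
    simp only [pvIter] at hx
    refine ih (pvStep tree s) ?_ x hx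
    intro y hy
    rcases (pv_mem_step tree s y).mp hy with h | ⟨e, he, _, rfl⟩
    · exact hs y h
    · exact Or.inr (List.mem_map_of_mem he)

theorem pv_iter_stable (tree : List (List String)) :
    ∀ (n : Nat) (s : PySem.Set String), pvStep tree s = s → pvIter tree n s = s := by
  intro n
  induction n with
  | zero => intro s _; rfl
  | succ n ih => intro s h; simp only [pvIter, h]; exact ih s h

theorem pv_reach_complete (tree : List (List String)) (r : String)
    (hr : r ∉ (pvEdges tree).map Prod.snd) :
    ∀ (n : Nat) (s : PySem.Set String), s.Nodup → r ∈ s →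
      (∀ x ∈ s, x = r ∨ x ∈ (pvEdges tree).map Prod.snd) →
      (PySem.Set.ofList ((pvEdges tree).map Prod.snd)).length + 1 ≤ n + s.length →
      ∀ x, pvReach (pvEdges tree) r x → x ∈ pvIter tree n s := by
  intro n
  induction n with
  | zero =>
    intro s hnd hrs hsub hbound x hx
    have hunind : (r :: PySem.Set.ofList ((pvEdges tree).map Prod.snd)).Nodup := by
      simp only [List.nodup_cons]
      exact ⟨by simpa [PySem.Set.mem_ofList] using hr, PySem.Set.nodup_ofList _⟩
    have hsubuni : s ⊆ r :: PySem.Set.ofList ((pvEdges tree).map Prod.snd) := by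
      intro y hy
      rcases hsub y hy with h | h
      · simp [h]
      · simp [PySem.Set.mem_ofList, h]
    have hsp := List.subperm_of_subset hnd hsubuni
    have hperm := hsp.perm_of_length_le (by simp only [List.length_cons]; omega)
    simp only [pvIter]
    rcases pv_reach_mem hx with rfl | h
    · exact hrs
    · exact hperm.mem_iff.mpr (by simp [PySem.Set.mem_ofList, h])
  | succ n ih =>
    intro s hnd hrs hsub hbound x hx
    by_cases hstab : pvStep tree s = s
    · have hfix : pvIter tree (n + 1) s = s := by
        simpa only [pvIter, hstab] using pv_iter_stable tree n s hstab
      rw [hfix]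
      induction hx with
      | refl => exact hrs
      | step hp he ihh =>
        have hm := (pv_mem_step tree s _).mpr (Or.inr ⟨_, he, ihh, rfl⟩)
        rw [hstab] at hm
        exact hm
    · obtain ⟨t, ht⟩ := pv_step_prefix tree s
      have htne : t ≠ [] := by rintro rfl; exact hstab (by simpa using ht)
      have hlen' : s.length + 1 ≤ (pvStep tree s).length := by
        rw [ht]
        cases t with
        | nil => exact absurd rfl htne
        | cons a t => simp
      have hrec := ih (pvStep tree s) (pv_step_nodup tree s hnd)
        (by rw [ht]; exact List.mem_append_left _ hrs)
        (fun y hy => by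
          rcases (pv_mem_step tree s y).mp hy with h | ⟨e, he, _, rfl⟩
          · exact hsub y h
          · exact Or.inr (List.mem_map_of_mem he))
        (by omega)
      simpa only [pvIter] using hrec x hx

-- ---- counting ----

theorem pv_sum_adj (E : List (String × String)) :
    ∀ (L : List String), L.Nodup → (∀ e ∈ E, e.1 ∈ L) →
      (L.map (fun p => (pvAdj E p).length)).sum = E.length := by
  induction E with
  | nil => intro L _ _; simp [pvAdj]
  | cons e E ih =>
    intro L hL hE
    have h1 : ∀ p, (pvAdj (e :: E) p).length =
        (if e.1 == p then 1 else 0) + (pvAdj E p).length := by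
      intro p
      by_cases h : e.1 == p
      · simp [pvAdj, h]; omega
      · simp [pvAdj, h]
    calc (L.map fun p => (pvAdj (e :: E) p).length).sum
        = (L.map fun p => (if e.1 == p then 1 else 0) + (pvAdj E p).length).sum := by
          simp only [h1]
      _ = (L.map fun p => if e.1 == p then 1 else 0).sum
            + (L.map fun p => (pvAdj E p).length).sum := List.sum_map_add
      _ = (e :: E).length := by
          rw [pv_sum_ite L (fun p => e.1 == p),
            ih L hL (fun e' he' => hE e' (List.mem_cons_of_mem _ he'))]
          have hq : L.countP (fun p => e.1 == p) = L.countP (fun x => x == e.1) :=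
            List.countP_congr (fun x _ => by rw [Bool.beq_comm])
          have hcnt : L.countP (fun x => x == e.1) = 1 := by
            simpa [List.count] using List.count_eq_one_of_mem hL (hE e (List.mem_cons_self ..))
          rw [hq, hcnt]
          simp [Nat.add_comm]

-- ===== VERDICT (by name: the statement is the Claim_ definition above) =====
theorem is_family_spec : Claim_equal_is_family := by
  intro tree _ hpre
  unfold Spec_is_family
  have hlen : (pvEdges tree).length = tree.length := pvEdges_length_of_pre tree hpre
  have hupdate : ∀ l : List String,
      PySem.Set.update PySem.Set.empty l = PySem.Set.ofList l := fun l => by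
    simp [PySem.Set.ofList_eq_foldl, PySem.Set.update, PySem.Set.empty]
  simp only [is_family, is_family_alt, pvParse_parents, pvParse_children,
    pvParseB_eq tree PySem.Set.empty PySem.Set.empty, hupdate]
  cases hD : PySem.Set.diff (PySem.Set.ofList ((pvEdges tree).map Prod.fst))
      (PySem.Set.ofList ((pvEdges tree).map Prod.snd)) with
  | nil => rfl
  | cons r rest =>
    cases rest with
    | cons r2 rest2 => rfl
    | nil =>
      dsimp only
      have hroot : ∀ x, (x ∈ (pvEdges tree).map Prod.fst ∧ x ∉ (pvEdges tree).map Prod.snd)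
          ↔ x = r := by
        intro x
        have h1 : x ∈ PySem.Set.diff (PySem.Set.ofList ((pvEdges tree).map Prod.fst))
            (PySem.Set.ofList ((pvEdges tree).map Prod.snd)) ↔
            (x ∈ (pvEdges tree).map Prod.fst ∧ x ∉ (pvEdges tree).map Prod.snd) := by
          rw [PySem.Set.mem_diff]; simp [PySem.Set.mem_ofList]
        rw [← h1, hD]; simp
      have hrpa : r ∈ (pvEdges tree).map Prod.fst := ((hroot r).mpr rfl).1
      have hrch : r ∉ (pvEdges tree).map Prod.snd := ((hroot r).mpr rfl).2
      have hpnd : (PySem.Set.union (PySem.Set.ofList ((pvEdges tree).map Prod.fst))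
          (PySem.Set.ofList ((pvEdges tree).map Prod.snd))).Nodup :=
        PySem.Set.nodup_union _ _ (PySem.Set.nodup_ofList _)
      have hpmem : ∀ x, x ∈ PySem.Set.union (PySem.Set.ofList ((pvEdges tree).map Prod.fst))
          (PySem.Set.ofList ((pvEdges tree).map Prod.snd)) ↔
          (x = r ∨ x ∈ (pvEdges tree).map Prod.snd) := by
        intro x
        rw [PySem.Set.mem_union]
        simp only [PySem.Set.mem_ofList]
        constructor
        · rintro (h | h)
          · by_cases hx : x ∈ (pvEdges tree).map Prod.snd
            · exact Or.inr hx
            · exact Or.inl ((hroot x).mp ⟨h, hx⟩)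
          · exact Or.inr h
        · rintro (rfl | h)
          · exact Or.inl hrpa
          · exact Or.inr h
      have hpperm : (PySem.Set.union (PySem.Set.ofList ((pvEdges tree).map Prod.fst))
          (PySem.Set.ofList ((pvEdges tree).map Prod.snd))).Perm
          (r :: PySem.Set.ofList ((pvEdges tree).map Prod.snd)) := by
        refine (List.perm_ext_iff_of_nodup hpnd ?_).mpr ?_
        · simp only [List.nodup_cons]
          exact ⟨by simpa [PySem.Set.mem_ofList] using hrch, PySem.Set.nodup_ofList _⟩
        · intro x; rw [hpmem]; simp [PySem.Set.mem_ofList]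
      have hplen : (PySem.Set.union (PySem.Set.ofList ((pvEdges tree).map Prod.fst))
          (PySem.Set.ofList ((pvEdges tree).map Prod.snd))).length =
          (PySem.Set.ofList ((pvEdges tree).map Prod.snd)).length + 1 := by
        rw [hpperm.length_eq]; simp
      have hofle : (PySem.Set.ofList ((pvEdges tree).map Prod.snd)).length ≤ tree.length := by
        have h1 := PySem.Set.length_ofList_le ((pvEdges tree).map Prod.snd)
        simp only [List.length_map] at h1
        omega
      have hEfst : ∀ e ∈ pvEdges tree, e.1 ∈ PySem.Set.union
          (PySem.Set.ofList ((pvEdges tree).map Prod.fst))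
          (PySem.Set.ofList ((pvEdges tree).map Prod.snd)) := fun e he =>
        (PySem.Set.mem_union _ _ _).mpr
          (Or.inl ((PySem.Set.mem_ofList _ _).mpr (List.mem_map_of_mem he)))
      have hadj : ∀ p, (pvParse tree).1.getD p [] = pvAdj (pvEdges tree) p := pvParse_getD tree
      rw [pv_foldl_range_eq tree tree.length [r]]
      have hRnodup : (pvIter tree tree.length [r]).Nodup :=
        pv_iter_nodup tree tree.length [r] (by simp)
      have hRsub : ∀ x ∈ pvIter tree tree.length [r],
          x = r ∨ x ∈ (pvEdges tree).map Prod.snd :=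
        pv_iter_sub tree r tree.length [r] (by intro x hx; simp at hx; exact Or.inl hx)
      have hRsubp : ∀ x ∈ pvIter tree tree.length [r], x ∈ PySem.Set.union
          (PySem.Set.ofList ((pvEdges tree).map Prod.fst))
          (PySem.Set.ofList ((pvEdges tree).map Prod.snd)) := fun x hx =>
        (hpmem x).mpr (hRsub x hx)
      have hRreach : ∀ x ∈ pvIter tree tree.length [r], pvReach (pvEdges tree) r x :=
        pv_iter_sound tree r tree.length [r]
          (by intro x hx; simp at hx; subst hx; exact pvReach.refl)
      have hreachR : ∀ x, pvReach (pvEdges tree) r x → x ∈ pvIter tree tree.length [r] :=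
        pv_reach_complete tree r hrch tree.length [r] (by simp) (by simp)
          (by intro x hx; simp at hx; subst hx; exact Or.inl rfl)
          (by simp only [List.length_singleton]; omega)
      by_cases hcnt : (PySem.Set.union (PySem.Set.ofList ((pvEdges tree).map Prod.fst))
          (PySem.Set.ofList ((pvEdges tree).map Prod.snd))).length = tree.length + 1
      · rw [if_pos hcnt]
        have hofch : (PySem.Set.ofList ((pvEdges tree).map Prod.snd)).length =
            ((pvEdges tree).map Prod.snd).length := by
          simp only [List.length_map]; omega
        have hchnd : ((pvEdges tree).map Prod.snd).Nodup := by
          have hsp : (PySem.Set.ofList ((pvEdges tree).map Prod.snd)).Subperm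
              ((pvEdges tree).map Prod.snd) :=
            List.subperm_of_subset (PySem.Set.nodup_ofList _)
              (fun x hx => (PySem.Set.mem_ofList _ _).mp hx)
          have hperm := hsp.perm_of_length_le (by omega)
          exact hperm.nodup_iff.mp (PySem.Set.nodup_ofList _)
        obtain ⟨v, hv⟩ := pvDfs_complete (pvParse tree).1 (pvEdges tree) hadj hchnd
          (tree.length + 1) PySem.Set.empty [r]
          (by simp [PySem.Set.empty])
          (by
            intro p c hpc
            constructor
            · intro hcm
              exfalso
              have : c = r := by simpa [PySem.Set.empty] using hcm
              subst this
              exact hrch (List.mem_map_of_mem (pv_mem_adj.mp hpc))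
            · intro hcm
              exact absurd hcm (List.not_mem_nil)
          )
          (by
            have h2 : ((pvEdges tree).map Prod.snd).length = tree.length := by
              rw [List.length_map, hlen]
            simp only [List.length_singleton]
            have hgoal : ∀ L : Nat, L ≤ tree.length → 1 + L ≤ tree.length + 1 := by omega
            exact hgoal _ (le_trans (List.length_filter_le _ _) (le_of_eq h2)))
        rw [hv]
        have hvmemP : ∀ x ∈ v, x ∈ PySem.Set.union
            (PySem.Set.ofList ((pvEdges tree).map Prod.fst))
            (PySem.Set.ofList ((pvEdges tree).map Prod.snd)) :=
          pvDfs_mem_P (pvParse tree).1 (· ∈ PySem.Set.union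
              (PySem.Set.ofList ((pvEdges tree).map Prod.fst))
              (PySem.Set.ofList ((pvEdges tree).map Prod.snd)))
            (fun p c _ hcg => (hpmem c).mpr (Or.inr (by
              rw [hadj p] at hcg
              exact List.mem_map_of_mem (pv_mem_adj.mp hcg))))
            _ _ _ _ hv (by simp [PySem.Set.empty])
            (by
              intro x hx
              have : x = r := by simpa using hx
              subst this
              exact (hpmem x).mpr (Or.inl rfl))
        have hvreach : ∀ x ∈ v, pvReach (pvEdges tree) r x :=
          pvDfs_mem_P (pvParse tree).1 (pvReach (pvEdges tree) r)
            (fun p c hp hcg => pvReach.step hp (pv_mem_adj.mp (by rwa [hadj p] at hcg)))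
            _ _ _ _ hv (by simp [PySem.Set.empty])
            (by
              intro x hx
              have : x = r := by simpa using hx
              subst this
              exact pvReach.refl)
        obtain ⟨hstackv, hclosedv⟩ := pvDfs_closed (pvParse tree).1 _ _ _ _ hv
          (by intro p hp; simp [PySem.Set.empty] at hp)
        have hrv : r ∈ v := hstackv r (by simp [PySem.Set.empty])
        have hreachv : ∀ x, pvReach (pvEdges tree) r x → x ∈ v := by
          intro x hx
          induction hx with
          | refl => exact hrv
          | step hp he ihh =>
            exact hclosedv _ ihh _ (by rw [hadj]; exact pv_mem_adj.mpr he)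
        refine Bool.coe_iff_coe.mp ?_
        rw [PySem.Set.equal_iff, beq_iff_eq]
        constructor
        · intro hmemiff
          have hPsubR : ∀ x ∈ PySem.Set.union
              (PySem.Set.ofList ((pvEdges tree).map Prod.fst))
              (PySem.Set.ofList ((pvEdges tree).map Prod.snd)),
              x ∈ pvIter tree tree.length [r] := fun x hx =>
            hreachR x (hvreach x ((hmemiff x).mpr hx))
          have hperm : (pvIter tree tree.length [r]).Perm (PySem.Set.union
              (PySem.Set.ofList ((pvEdges tree).map Prod.fst))
              (PySem.Set.ofList ((pvEdges tree).map Prod.snd))) :=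
            (List.perm_ext_iff_of_nodup hRnodup hpnd).mpr
              (fun x => ⟨fun h => hRsubp x h, fun h => hPsubR x h⟩)
          exact hperm.length_eq
        · intro hleneq
          have hsp : (pvIter tree tree.length [r]).Subperm (PySem.Set.union
              (PySem.Set.ofList ((pvEdges tree).map Prod.fst))
              (PySem.Set.ofList ((pvEdges tree).map Prod.snd))) :=
            List.subperm_of_subset hRnodup hRsubp
          have hperm := hsp.perm_of_length_le (by omega)
          intro x
          constructor
          · exact fun h => hvmemP x h
          · intro hx
            exact hreachv x (hRreach x (hperm.mem_iff.mpr hx))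
      · rw [if_neg hcnt]
        cases hv : pvDfs (pvParse tree).1 (tree.length + 1) PySem.Set.empty [r] with
        | none => rfl
        | some v =>
          refine Bool.eq_false_iff.mpr (fun heq => hcnt ?_)
          have hmemiff := (PySem.Set.equal_iff v _).mp heq
          obtain ⟨w, hw, hwnd, _, hwlen⟩ := pvDfs_shape _ _ _ _ _ hv
          have hveq : v = w := by simpa [PySem.Set.empty] using hw
          subst hveq
          have hvperm : v.Perm (PySem.Set.union
              (PySem.Set.ofList ((pvEdges tree).map Prod.fst))
              (PySem.Set.ofList ((pvEdges tree).map Prod.snd))) :=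
            (List.perm_ext_iff_of_nodup hwnd hpnd).mpr hmemiff
          have hsum : (v.map (fun p => ((pvParse tree).1.getD p []).length)).sum =
              (v.map (fun p => (pvAdj (pvEdges tree) p).length)).sum := by
            simp only [hadj]
          have hsum2 : (v.map (fun p => (pvAdj (pvEdges tree) p).length)).sum =
              ((PySem.Set.union (PySem.Set.ofList ((pvEdges tree).map Prod.fst))
                (PySem.Set.ofList ((pvEdges tree).map Prod.snd))).map
                (fun p => (pvAdj (pvEdges tree) p).length)).sum :=
            (hvperm.map _).sum_eq
          have hsum3 := pv_sum_adj (pvEdges tree) _ hpnd hEfst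
          have hvlen := hvperm.length_eq
          simp only [List.length_singleton] at hwlen
          omega
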